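-- pv_equiv track=rewrite | github.com/xornic1229/A-Maze-ing | DFS_algorithm.py | validate_walls
-- ===== SOURCE A (Python) =====
-- N = 1
--
-- E = 2
--
-- S = 4
--
-- W = 8
--
-- def validate_walls(maze):
--     rows = len(maze)
--     cols = len(maze[0])
--
--     for r in range(rows):
--         for c in range(cols):
--             walls = maze[r][c]
--
--             # Si una pared existe en un lado pero no en el otro
--             # → inconsistencia → False.
--             if r > 0:
--                 if ((walls & N) > 0) != ((maze[r - 1][c] & S) > 0):
--                     return (False)
--             if r < rows - 1:
--                 if ((walls & S) > 0) != ((maze[r + 1][c] & N) > 0):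
--                     return (False)
--             if c > 0:
--                 if ((walls & W) > 0) != ((maze[r][c - 1] & E) > 0):
--                     return (False)
--             if c < cols - 1:
--                 if ((walls & E) > 0) != ((maze[r][c + 1] & W) > 0):
--                     return (False)
--     return (True)
-- ===== SOURCE B (Python) =====
-- N = 1
--
-- E = 2
--
-- S = 4
--
-- W = 8
--
-- def validate_walls(maze):
--     cols = len(maze[0])
--     grid = [row[:cols] for row in maze]
--     # Project each wall direction into a boolean matrix, then compare the
--     # East matrix (minus last column) with the West matrix (minus first column),
--     # and the South matrix (minus last row) with the North matrix (minus first row).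
--     east = [[(x & E) > 0 for x in row[:-1]] for row in grid]
--     west = [[(x & W) > 0 for x in row[1:]] for row in grid]
--     south = [[(x & S) > 0 for x in row] for row in grid[:-1]]
--     north = [[(x & N) > 0 for x in row] for row in grid[1:]]
--     return east == west and south == north
-- ===== Notes on version B (the rewrite author's own statement) =====
-- stated objective: alternative
-- what changed: B replaces A's per-cell four-direction scan with early return by a data-level formulation: it projects the maze into four boolean wall matrices (E, W, S, N) via comprehensions and slicing and decides consistency by two wholesale matrix equality comparisons, with no index loops or early exit.
-- outside the precondition, e.g. on validate_walls([[4, 0], [0]]): A returns False, B returns False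
import Mathlib
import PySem

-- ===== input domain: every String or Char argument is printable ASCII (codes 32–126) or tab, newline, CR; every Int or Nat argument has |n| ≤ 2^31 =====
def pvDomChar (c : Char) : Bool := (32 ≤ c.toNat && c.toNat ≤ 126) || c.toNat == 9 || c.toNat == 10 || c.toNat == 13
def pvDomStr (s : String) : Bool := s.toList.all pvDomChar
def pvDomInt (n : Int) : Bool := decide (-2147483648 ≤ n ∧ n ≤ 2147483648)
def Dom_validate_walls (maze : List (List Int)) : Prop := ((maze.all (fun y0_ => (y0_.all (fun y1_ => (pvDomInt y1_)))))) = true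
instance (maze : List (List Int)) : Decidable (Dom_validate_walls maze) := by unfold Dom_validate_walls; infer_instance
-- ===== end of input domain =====

-- B projects the maze into four boolean wall matrices (via slicing/mapping) and compares them
-- wholesale, instead of A's per-cell four-direction scan with early return; same O(rows*cols) cost.


-- ===== PORT A =====
-- maze[r][c] (indices always in range under Pre_; Python would raise IndexError outside)
def pvCell (maze : List (List Int)) (r c : Int) : Int :=
  PySem.List.pyGetD (PySem.List.pyGetD maze r []) c 0

-- the body of A's inner loop: the four guarded neighbour checks at cell (r, c), in A's order
def pvACell (maze : List (List Int)) (rows cols r c : Int) : Bool :=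
  let walls := pvCell maze r c
  if 0 < r ∧ (decide (0 < PySem.Int.band walls 1) ≠ decide (0 < PySem.Int.band (pvCell maze (r - 1) c) 4)) then
    false
  else if r < rows - 1 ∧ (decide (0 < PySem.Int.band walls 4) ≠ decide (0 < PySem.Int.band (pvCell maze (r + 1) c) 1)) then
    false
  else if 0 < c ∧ (decide (0 < PySem.Int.band walls 8) ≠ decide (0 < PySem.Int.band (pvCell maze r (c - 1)) 2)) then
    false
  else if c < cols - 1 ∧ (decide (0 < PySem.Int.band walls 2) ≠ decide (0 < PySem.Int.band (pvCell maze r (c + 1)) 8)) then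
    false
  else
    true

-- 'for c in range(cols)' with early 'return False'
def pvALoopC (maze : List (List Int)) (rows cols r : Int) : List Int → Bool
  | [] => true
  | c :: cs => if pvACell maze rows cols r c then pvALoopC maze rows cols r cs else false

-- 'for r in range(rows)' with early 'return False'
def pvALoopR (maze : List (List Int)) (rows cols : Int) : List Int → Bool
  | [] => true
  | r :: rs => if pvALoopC maze rows cols r (PySem.List.pyRange 0 cols 1) then pvALoopR maze rows cols rs else false

def validate_walls (maze : List (List Int)) : Bool :=
  let rows : Int := maze.length
  let cols : Int := (PySem.List.pyGetD maze 0 ([] : List Int)).length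
  pvALoopR maze rows cols (PySem.List.pyRange 0 rows 1)

-- ===== PORT B =====
-- (x & bit) > 0
def pvBit (bit : Int) (x : Int) : Bool := decide (0 < PySem.Int.band x bit)

def validate_walls_alt (maze : List (List Int)) : Bool :=
  let cols : Int := (PySem.List.pyGetD maze 0 ([] : List Int)).length
  let grid := maze.map (fun row => PySem.List.slice row none (some cols))
  let east := grid.map (fun row => (PySem.List.slice row none (some (-1))).map (pvBit 2))
  let west := grid.map (fun row => (PySem.List.slice row (some 1) none).map (pvBit 8))
  let south := (PySem.List.slice grid none (some (-1))).map (fun row => row.map (pvBit 4))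
  let north := (PySem.List.slice grid (some 1) none).map (fun row => row.map (pvBit 1))
  east == west && south == north

-- ===== PRECONDITION & SPEC =====
-- Pre_ excludes the empty maze (A raises IndexError on maze[0]) and mazes with a row shorter
-- than the first row, on which A either raises IndexError partway through its scan or returns
-- False at whichever mismatch the scan meets before the missing cell.
def Pre_validate_walls (maze : List (List Int)) : Prop :=
  maze ≠ [] ∧ ∀ row ∈ maze, (maze.getD 0 []).length ≤ row.length
instance (maze : List (List Int)) : Decidable (Pre_validate_walls maze) := by
  unfold Pre_validate_walls; infer_instance
def pvWitness_validate_walls : List (List Int) := [[6, 12], [3, 9]]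
def Spec_validate_walls (maze : List (List Int)) (out : Bool) : Prop := out = validate_walls_alt maze
instance (maze : List (List Int)) (out : Bool) : Decidable (Spec_validate_walls maze out) := by unfold Spec_validate_walls; infer_instance

-- ===== CLAIM (what is proved, stated in full; the proofs are below) =====
def Claim_equal_validate_walls : Prop := ∀ (maze : List (List Int)), Dom_validate_walls maze → Pre_validate_walls maze → Spec_validate_walls maze (validate_walls maze)

-- ===== LEMMAS AND PROOFS =====

-- cell access with Nat indices, out of range defaulting (never hit under the bounds used)
def pvM (maze : List (List Int)) (r c : Nat) : Int := (maze.getD r []).getD c 0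

-- the common Nat-indexed characterisation both ports are reduced to
def pvQH (maze : List (List Int)) (cols : Nat) : Prop :=
  ∀ r < maze.length, ∀ c, c + 1 < cols → pvBit 2 (pvM maze r c) = pvBit 8 (pvM maze r (c+1))
def pvQV (maze : List (List Int)) (cols : Nat) : Prop :=
  ∀ r, r + 1 < maze.length → ∀ c < cols, pvBit 4 (pvM maze r c) = pvBit 1 (pvM maze (r+1) c)

lemma pvCell_eq (maze : List (List Int)) (r c : Int) (hr : 0 ≤ r) (hc : 0 ≤ c) :
    pvCell maze r c = pvM maze r.toNat c.toNat := by
  unfold pvCell pvM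
  rw [show r = ((r.toNat : Nat) : Int) from (Int.toNat_of_nonneg hr).symm,
      show c = ((c.toNat : Nat) : Int) from (Int.toNat_of_nonneg hc).symm,
      PySem.List.pyGetD_natCast, PySem.List.pyGetD_natCast]
  simp [max_eq_left hr, max_eq_left hc]

-- Int-level edge predicates (the direction A writes them)
def pvH (maze : List (List Int)) (r c : Int) : Prop :=
  0 < PySem.Int.band (pvCell maze r c) 2 ↔ 0 < PySem.Int.band (pvCell maze r (c + 1)) 8
def pvV (maze : List (List Int)) (r c : Int) : Prop :=
  0 < PySem.Int.band (pvCell maze r c) 4 ↔ 0 < PySem.Int.band (pvCell maze (r + 1) c) 1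

-- bridges between the Int-level edge predicates and the Nat-level Bool equalities
lemma pvHc (maze : List (List Int)) (r c : Nat) :
    pvH maze (r : Int) (c : Int) ↔ pvBit 2 (pvM maze r c) = pvBit 8 (pvM maze r (c+1)) := by
  unfold pvH pvBit
  rw [show ((c : Int) + 1) = ((c + 1 : Nat) : Int) by push_cast; ring]
  rw [pvCell_eq _ _ _ (by positivity) (by positivity),
      pvCell_eq _ _ _ (by positivity) (by positivity)]
  simp [decide_eq_decide]

lemma pvVc (maze : List (List Int)) (r c : Nat) :
    pvV maze (r : Int) (c : Int) ↔ pvBit 4 (pvM maze r c) = pvBit 1 (pvM maze (r+1) c) := by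
  unfold pvV pvBit
  rw [show ((r : Int) + 1) = ((r + 1 : Nat) : Int) by push_cast; ring]
  rw [pvCell_eq _ _ _ (by positivity) (by positivity),
      pvCell_eq _ _ _ (by positivity) (by positivity)]
  simp [decide_eq_decide]

lemma pvACell_iff (maze : List (List Int)) (rows cols r c : Int) :
    pvACell maze rows cols r c = true ↔
      ((0 < r → pvV maze (r - 1) c) ∧ (r < rows - 1 → pvV maze r c) ∧
       (0 < c → pvH maze r (c - 1)) ∧ (c < cols - 1 → pvH maze r c)) := by
  unfold pvACell pvV pvH
  dsimp only
  simp only [sub_add_cancel, ne_eq, decide_eq_decide]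
  split_ifs with h1 h2 h3 h4 <;> constructor <;> intro h <;> simp_all

lemma pvALoopC_all (maze : List (List Int)) (rows cols r : Int) (l : List Int) :
    pvALoopC maze rows cols r l = l.all (fun c => pvACell maze rows cols r c) := by
  induction l with
  | nil => rfl
  | cons c cs ih =>
    simp only [pvALoopC, ih, List.all_cons]
    split_ifs with h <;> simp [h]

lemma pvALoopR_all (maze : List (List Int)) (rows cols : Int) (l : List Int) :
    pvALoopR maze rows cols l = l.all (fun r => pvALoopC maze rows cols r (PySem.List.pyRange 0 cols 1)) := by
  induction l with
  | nil => rfl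
  | cons r rs ih =>
    simp only [pvALoopR, ih, List.all_cons]
    split_ifs with h <;> simp [h]

-- A's doubly-checked per-cell conditions say exactly "every edge, each direction once"
lemma pvGrid_iff (maze : List (List Int)) (rows cols : Int) :
    (∀ r, 0 ≤ r → r < rows → ∀ c, 0 ≤ c → c < cols →
        ((0 < r → pvV maze (r - 1) c) ∧ (r < rows - 1 → pvV maze r c) ∧
         (0 < c → pvH maze r (c - 1)) ∧ (c < cols - 1 → pvH maze r c))) ↔
      ((∀ r, 0 ≤ r → r < rows → ∀ c, 0 ≤ c → c < cols - 1 → pvH maze r c) ∧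
       (∀ r, 0 ≤ r → r < rows - 1 → ∀ c, 0 ≤ c → c < cols → pvV maze r c)) := by
  constructor
  · intro h
    constructor
    · intro r h0 hr c h0c hc
      exact (h r h0 hr c h0c (by omega)).2.2.2 hc
    · intro r h0 hr c h0c hc
      exact (h r h0 (by omega) c h0c hc).2.1 hr
  · rintro ⟨hH, hV⟩ r h0 hr c h0c hc
    refine ⟨fun h' => ?_, fun h' => hV r h0 h' c h0c hc, fun h' => ?_, fun h' => hH r h0 hr c h0c h'⟩
    · have := hV (r - 1) (by omega) (by omega) c h0c hc
      simpa [sub_add_cancel] using this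
    · have := hH r h0 hr (c - 1) (by omega) (by omega)
      simpa [sub_add_cancel] using this

-- A = true ↔ QH ∧ QV (with cols = length of first row)
lemma pvA_iff (maze : List (List Int)) :
    validate_walls maze = true ↔
      (pvQH maze (maze.getD 0 []).length ∧ pvQV maze (maze.getD 0 []).length) := by
  unfold validate_walls
  dsimp only
  rw [pvALoopR_all]
  have hc0 : (PySem.List.pyGetD maze 0 ([] : List Int)) = maze.getD 0 [] := by
    simp [PySem.List.pyGetD_zero]
  rw [hc0]
  set colsN : Nat := (maze.getD 0 []).length with hcols
  simp only [List.all_eq_true, PySem.List.mem_pyRange_one]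
  have key : (∀ r : Int, 0 ≤ r ∧ r < (maze.length : Int) →
      pvALoopC maze (maze.length : Int) (colsN : Int) r (PySem.List.pyRange 0 (colsN : Int) 1) = true) ↔
      (∀ r, 0 ≤ r → r < (maze.length : Int) → ∀ c, 0 ≤ c → c < (colsN : Int) →
        ((0 < r → pvV maze (r - 1) c) ∧ (r < (maze.length : Int) - 1 → pvV maze r c) ∧
         (0 < c → pvH maze r (c - 1)) ∧ (c < (colsN : Int) - 1 → pvH maze r c))) := by
    constructor
    · intro hA r h0 hr c h0c hc
      have := hA r ⟨h0, hr⟩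
      rw [pvALoopC_all] at this
      simp only [List.all_eq_true, PySem.List.mem_pyRange_one] at this
      exact (pvACell_iff _ _ _ _ _).mp (this c ⟨h0c, hc⟩)
    · intro h r hr
      rw [pvALoopC_all]
      simp only [List.all_eq_true, PySem.List.mem_pyRange_one]
      intro c hc
      exact (pvACell_iff _ _ _ _ _).mpr (h r hr.1 hr.2 c hc.1 hc.2)
  rw [key, pvGrid_iff maze (maze.length : Int) (colsN : Int)]
  unfold pvQH pvQV
  constructor
  · rintro ⟨hH, hV⟩
    constructor
    · intro r hr c hc
      exact (pvHc maze r c).mp (hH (r : Int) (by positivity) (by exact_mod_cast hr)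
        (c : Int) (by positivity) (by omega))
    · intro r hr c hc
      exact (pvVc maze r c).mp (hV (r : Int) (by positivity) (by omega)
        (c : Int) (by positivity) (by exact_mod_cast hc))
  · rintro ⟨hQH, hQV⟩
    constructor
    · intro r h0 hr c h0c hc
      have := (pvHc maze r.toNat c.toNat).mpr (hQH r.toNat (by omega) c.toNat (by omega))
      rwa [Int.toNat_of_nonneg h0, Int.toNat_of_nonneg h0c] at this
    · intro r h0 hr c h0c hc
      have := (pvVc maze r.toNat c.toNat).mpr (hQV r.toNat (by omega) c.toNat (by omega))
      rwa [Int.toNat_of_nonneg h0, Int.toNat_of_nonneg h0c] at this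

-- generic "column-shifted maps agree" characterisation (used for both passes of B)
lemma pvShift {α β : Type} (l : List α) (d : α) (f g : α → β) :
    (l.dropLast.map f = l.tail.map g) ↔
      ∀ i, i + 1 < l.length → f (l.getD i d) = g (l.getD (i+1) d) := by
  constructor
  · intro h i hi
    have h1 : i < l.dropLast.length := by simp [List.length_dropLast]; omega
    have h2 : i < l.tail.length := by simp [List.length_tail]; omega
    have := congrArg (fun t => t.getD i (f d)) h
    simp only [List.getD_eq_getElem?_getD, List.getElem?_map] at this
    rw [List.getElem?_eq_getElem h1, List.getElem?_eq_getElem h2] at this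
    simp only [Option.map_some, Option.getD_some] at this
    rw [List.getElem_dropLast, List.getElem_tail] at this
    rw [List.getD_eq_getElem l d (by omega), List.getD_eq_getElem l d (by omega)]
    exact this
  · intro h
    apply List.ext_getElem
    · simp [List.length_dropLast, List.length_tail]
    · intro i h1 h2
      simp only [List.getElem_map, List.getElem_dropLast, List.getElem_tail]
      have hi : i + 1 < l.length := by
        simp [List.length_dropLast] at h1; omega
      have := h i hi
      rw [List.getD_eq_getElem l d (by omega), List.getD_eq_getElem l d (by omega)] at this
      exact this

-- pointwise characterisation of equality of two maps over equal-length lists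
lemma pvMapEq {α β : Type} (l1 l2 : List α) (d : α) (f g : α → β) (hlen : l1.length = l2.length) :
    (l1.map f = l2.map g) ↔ ∀ i < l1.length, f (l1.getD i d) = g (l2.getD i d) := by
  constructor
  · intro h i hi
    have := congrArg (fun t => t.getD i (f d)) h
    simp only [List.getD_eq_getElem?_getD, List.getElem?_map] at this
    rw [List.getElem?_eq_getElem (by simpa using hi),
        List.getElem?_eq_getElem (by omega)] at this
    simp only [Option.map_some, Option.getD_some] at this
    rw [List.getD_eq_getElem l1 d hi, List.getD_eq_getElem l2 d (by omega)]
    exact this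
  · intro h
    apply List.ext_getElem
    · simp [hlen]
    · intro i h1 h2
      simp only [List.getElem_map]
      have hi : i < l1.length := by simpa using h1
      have := h i hi
      rw [List.getD_eq_getElem l1 d hi, List.getD_eq_getElem l2 d (by omega)] at this
      exact this

-- grid's rows are the maze's rows truncated to cols entries
lemma pvGridRow (maze : List (List Int)) (cols : Nat) (r : Nat) (hr : r < maze.length) :
    ((maze.map (fun row => row.take cols)).getD r []) = (maze.getD r []).take cols := by
  rw [List.getD_eq_getElem _ _ (by simpa using hr), List.getElem_map,
      List.getD_eq_getElem _ _ hr]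

lemma pvRowLen (maze : List (List Int)) (hpre : Pre_validate_walls maze) (r : Nat)
    (hr : r < maze.length) :
    ((maze.getD r []).take (maze.getD 0 []).length).length = (maze.getD 0 []).length := by
  rw [List.length_take]
  have := hpre.2 (maze.getD r []) (by
    rw [List.getD_eq_getElem _ _ hr]; exact List.getElem_mem hr)
  omega

lemma pvTakeGetD (maze : List (List Int)) (hpre : Pre_validate_walls maze) (r c : Nat)
    (hr : r < maze.length) (hc : c < (maze.getD 0 []).length) :
    ((maze.getD r []).take (maze.getD 0 []).length).getD c 0 = pvM maze r c := by
  unfold pvM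
  have hcr : c < (maze.getD r []).length := by
    have := hpre.2 (maze.getD r []) (by
      rw [List.getD_eq_getElem _ _ hr]; exact List.getElem_mem hr)
    omega
  rw [List.getD_eq_getElem _ _ (by rw [List.length_take]; omega),
      List.getD_eq_getElem _ _ hcr, List.getElem_take]

-- B = true ↔ QH ∧ QV
lemma pvB_iff (maze : List (List Int)) (hpre : Pre_validate_walls maze) :
    validate_walls_alt maze = true ↔
      (pvQH maze (maze.getD 0 []).length ∧ pvQV maze (maze.getD 0 []).length) := by
  unfold validate_walls_alt
  dsimp only
  have hc0 : (PySem.List.pyGetD maze 0 ([] : List Int)) = maze.getD 0 [] := by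
    simp [PySem.List.pyGetD_zero]
  rw [hc0]
  set cols : Nat := (maze.getD 0 []).length with hcols
  have hslice : ∀ row : List Int, PySem.List.slice row none (some ((cols : Nat) : Int)) = row.take cols :=
    fun row => PySem.List.slice_to_natCast row cols
  simp only [hslice, PySem.List.slice_to_neg_one, PySem.List.slice_from_one, List.map_map]
  rw [Bool.and_eq_true, beq_iff_eq, beq_iff_eq]
  rw [pvMapEq maze maze ([] : List Int)
        ((fun row => row.dropLast.map (pvBit 2)) ∘ (fun row => row.take cols))
        ((fun row => row.tail.map (pvBit 8)) ∘ (fun row => row.take cols)) rfl,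
      pvShift (maze.map (fun row => row.take cols)) ([] : List Int)
        (fun row => row.map (pvBit 4)) (fun row => row.map (pvBit 1))]
  simp only [Function.comp, List.length_map]
  unfold pvQH pvQV
  constructor
  · rintro ⟨hH, hV⟩
    constructor
    · -- horizontal
      intro r hr c hc
      have hrow := hH r hr
      have := (pvShift ((maze.getD r []).take cols) (0 : Int) (pvBit 2) (pvBit 8)).mp hrow c
        (by rw [pvRowLen maze hpre r hr]; omega)
      rwa [pvTakeGetD maze hpre r c hr (by omega),
           pvTakeGetD maze hpre r (c+1) hr (by omega)] at this
    · -- vertical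
      intro r hr c hc
      have hrow := hV r hr
      rw [pvGridRow maze cols r (by omega), pvGridRow maze cols (r+1) (by omega)] at hrow
      have hlen : (((maze.getD r []).take cols).length) = (((maze.getD (r+1) []).take cols).length) := by
        rw [pvRowLen maze hpre r (by omega), pvRowLen maze hpre (r+1) (by omega)]
      have := (pvMapEq _ _ (0 : Int) (pvBit 4) (pvBit 1) hlen).mp hrow c
        (by rw [pvRowLen maze hpre r (by omega)]; omega)
      rwa [pvTakeGetD maze hpre r c (by omega) hc,
           pvTakeGetD maze hpre (r+1) c (by omega) hc] at this
  · rintro ⟨hQH, hQV⟩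
    constructor
    · intro r hr
      apply (pvShift ((maze.getD r []).take cols) (0 : Int) (pvBit 2) (pvBit 8)).mpr
      intro c hc
      rw [pvRowLen maze hpre r hr] at hc
      rw [pvTakeGetD maze hpre r c hr (by omega),
          pvTakeGetD maze hpre r (c+1) hr (by omega)]
      exact hQH r hr c hc
    · intro r hr
      rw [pvGridRow maze cols r (by omega), pvGridRow maze cols (r+1) (by omega)]
      have hlen : (((maze.getD r []).take cols).length) = (((maze.getD (r+1) []).take cols).length) := by
        rw [pvRowLen maze hpre r (by omega), pvRowLen maze hpre (r+1) (by omega)]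
      apply (pvMapEq _ _ (0 : Int) (pvBit 4) (pvBit 1) hlen).mpr
      intro c hcg
      rw [pvRowLen maze hpre r (by omega)] at hcg
      rw [pvTakeGetD maze hpre r c (by omega) hcg,
          pvTakeGetD maze hpre (r+1) c (by omega) hcg]
      exact hQV r hr c hcg

theorem pv_main (maze : List (List Int)) (hpre : Pre_validate_walls maze) :
    validate_walls maze = validate_walls_alt maze := by
  rw [Bool.eq_iff_iff, pvA_iff maze, pvB_iff maze hpre]

-- ===== VERDICT (by name: the statement is the Claim_ definition above) =====
theorem validate_walls_spec : Claim_equal_validate_walls := by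
  intro maze _ hpre
  unfold Spec_validate_walls
  exact pv_main maze hpre
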